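-- pv_equiv track=rewrite | github.com/jsf2408/Risk | .vscode/risk.py | pathCheck
-- ===== SOURCE A (Python) =====
-- def pathCheck(ownerList,troopList,seedCountry,targetCountry, playerTurn = 0):
--     borderCountries = []
--     borderCountries.append(seedCountry)
--     newBorders = []
--     while True:
--         for z in borderCountries:
--             for i in borderList[z]:
--                 newBorders.append(i)
--
--         removeCountries = []
--         for i in newBorders:
--             if ownerList[i] != playerTurn:
--                 removeCountries.append(i)
--
--         for i in newBorders:
--             for j in borderCountries:
--                 if i==j:
--                     removeCountries.append(i)
--
--         for i in removeCountries:
--             while i in newBorders: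
--                 newBorders.remove(i)
--
--         newBorders = list(dict.fromkeys(newBorders))
--
--         if len(newBorders) > 0:
--             for i in newBorders:
--                 borderCountries.append(i)
--         else:
--             break
--
--     if targetCountry in borderCountries:
--         return True
--     else:
--         return False
--
-- borderList = [[1,2,31],[0,2,3,4],[0,1,3,4,5],[1,2,4,6,13],[1,2,3,5,6,7],[2,4,7,8],[3,4,7],[4,5,6,8],[5,7,9], #0-8 north america
--             [8,10,11],[9,11,12,20],[9,10,12],[10,11], #9-12 south america
--             [3,14,15],[13,15,16,18],[13,14,16,17],[14,15,17,18,19],[15,16,19,20],[14,16,19,26,27,28],[16,17,18,20,21,28], #13-19 europe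
--             [10,17,19,21,22,23],[19,20,22,28],[20,21,23,24,25,28],[20,22,24],[22,23,25],[22,24], #20-25 africa
--             [18,27,29,35],[18,26,28,35,36],[18,19,21,22,27,36],[26,30,32,34,35],[29,31,32],[0,30,32,33,34],[29,30,31,34],[31,34],[29,31,32,33,35],[26,27,29,34,36,37],[27,28,35,37],[35,36,38], #26-37 asia
--             [37,39],[38,40,41],[39,41],[39,40]] #38-41 oceania
-- ===== SOURCE B (Python) =====
-- # B: single worklist traversal with a visited list and an index pointer, instead of
-- # A's per-round frontier recompute / remove-pass / dedup loop.
-- borderList = [[1,2,31],[0,2,3,4],[0,1,3,4,5],[1,2,4,6,13],[1,2,3,5,6,7],[2,4,7,8],[3,4,7],[4,5,6,8],[5,7,9], #0-8 north america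
--             [8,10,11],[9,11,12,20],[9,10,12],[10,11], #9-12 south america
--             [3,14,15],[13,15,16,18],[13,14,16,17],[14,15,17,18,19],[15,16,19,20],[14,16,19,26,27,28],[16,17,18,20,21,28], #13-19 europe
--             [10,17,19,21,22,23],[19,20,22,28],[20,21,23,24,25,28],[20,22,24],[22,23,25],[22,24], #20-25 africa
--             [18,27,29,35],[18,26,28,35,36],[18,19,21,22,27,36],[26,30,32,34,35],[29,31,32],[0,30,32,33,34],[29,30,31,34],[31,34],[29,31,32,33,35],[26,27,29,34,36,37],[27,28,35,37],[35,36,38], #26-37 asia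
--             [37,39],[38,40,41],[39,41],[39,40]] #38-41 oceania
--
-- def pathCheck(ownerList, troopList, seedCountry, targetCountry, playerTurn=0):
--     visited = [seedCountry]
--     i = 0
--     while i < len(visited):
--         for v in borderList[visited[i]]:
--             if ownerList[v] == playerTurn and v not in visited:
--                 visited.append(v)
--         i += 1
--     return targetCountry in visited
-- ===== Notes on version B (the rewrite author's own statement) =====
-- stated objective: simpler
-- what changed: Replaced A's whole-frontier while-loop (recompute all neighbours of every border country each round, build a removeCountries list, strip it with repeated list.remove, dedup via dict.fromkeys, append the surviving frontier) with a single worklist traversal: one visited list and an index pointer, scanning each country's neighbours exactly once and appending owned unseen neighbours.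
import Mathlib
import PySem

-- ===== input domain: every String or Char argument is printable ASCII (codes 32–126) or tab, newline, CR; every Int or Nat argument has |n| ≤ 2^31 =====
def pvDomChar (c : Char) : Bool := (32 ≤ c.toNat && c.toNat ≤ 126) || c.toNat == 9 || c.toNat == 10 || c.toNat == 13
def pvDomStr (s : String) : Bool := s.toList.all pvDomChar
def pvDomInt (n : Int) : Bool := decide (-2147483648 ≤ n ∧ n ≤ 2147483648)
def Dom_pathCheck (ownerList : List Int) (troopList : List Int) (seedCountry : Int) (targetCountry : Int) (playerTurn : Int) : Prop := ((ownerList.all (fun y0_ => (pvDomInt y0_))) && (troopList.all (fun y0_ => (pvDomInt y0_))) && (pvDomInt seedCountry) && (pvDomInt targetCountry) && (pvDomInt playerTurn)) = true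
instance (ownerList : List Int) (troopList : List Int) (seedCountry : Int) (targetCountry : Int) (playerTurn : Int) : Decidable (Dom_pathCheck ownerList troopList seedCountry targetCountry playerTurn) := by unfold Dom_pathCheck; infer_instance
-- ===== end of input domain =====

-- B replaces A's per-round frontier recompute / remove-pass / dedup while-loop by a single
-- worklist traversal over a growing visited list with an index pointer (objective: simpler).

-- ===== PORT A =====
-- the module constant borderList (fixed 42-country adjacency map)
def borderL : List (List Int) := [[1,2,31],[0,2,3,4],[0,1,3,4,5],[1,2,4,6,13],[1,2,3,5,6,7],[2,4,7,8],[3,4,7],[4,5,6,8],[5,7,9],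
  [8,10,11],[9,11,12,20],[9,10,12],[10,11],
  [3,14,15],[13,15,16,18],[13,14,16,17],[14,15,17,18,19],[15,16,19,20],[14,16,19,26,27,28],[16,17,18,20,21,28],
  [10,17,19,21,22,23],[19,20,22,28],[20,21,23,24,25,28],[20,22,24],[22,23,25],[22,24],
  [18,27,29,35],[18,26,28,35,36],[18,19,21,22,27,36],[26,30,32,34,35],[29,31,32],[0,30,32,33,34],[29,30,31,34],[31,34],[29,31,32,33,35],[26,27,29,34,36,37],[27,28,35,37],[35,36,38],
  [37,39],[38,40,41],[39,41],[39,40]]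

-- `ownerList[v] == playerTurn`; exact whenever the access succeeds (Pre_ guarantees that;
-- where Python raises IndexError, pyGet? is none and this returns false — outside Pre_).
def pvOwned (ownerList : List Int) (playerTurn : Int) (v : Int) : Bool :=
  PySem.List.pyGet? ownerList v == some playerTurn

-- `for z in borderCountries: for i in borderList[z]: newBorders.append(i)`; none = IndexError
def pvCollect (bc : List Int) (nb : List Int) : Option (List Int) :=
  match bc with
  | [] => some nb
  | z :: rest =>
    match PySem.List.pyGet? borderL z with
    | none => none
    | some l => pvCollect rest (nb ++ l)

-- `for i in newBorders: for j in borderCountries: if i==j: removeCountries.append(i)`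
def pvPass2 (bc : List Int) : List Int → List Int
  | [] => []
  | i :: t => (bc.filter (fun j => i == j)).map (fun _ => i) ++ pvPass2 bc t

-- effect of `while i in newBorders: newBorders.remove(i)`: removes every occurrence of i
def pvRemoveAll (x : Int) : List Int → List Int
  | [] => []
  | a :: t => if a == x then pvRemoveAll x t else a :: pvRemoveAll x t

-- termination measure for both while-loops: countries 0..41 not yet in the accumulated list
def pvMeasure (bc : List Int) : Nat :=
  ((Finset.range 42).filter (fun i => ¬ (((i : Nat) : Int) ∈ bc))).card

-- lemmas cited by the ports' termination proofs
lemma pv_mem_removeAll (x y : Int) (l : List Int) :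
    y ∈ pvRemoveAll x l ↔ y ∈ l ∧ y ≠ x := by
  induction l with
  | nil => simp [pvRemoveAll]
  | cons a t ih => by_cases h : a = x <;> simp [pvRemoveAll, h, ih] <;> aesop

lemma pv_mem_foldl_removeAll (rc : List Int) (l : List Int) (y : Int) :
    y ∈ rc.foldl (fun cur i => pvRemoveAll i cur) l ↔ y ∈ l ∧ y ∉ rc := by
  induction rc generalizing l with
  | nil => simp
  | cons i t ih => simp only [List.foldl_cons, ih, pv_mem_removeAll, List.mem_cons]; tauto

lemma pv_mem_pass2 (bc nb : List Int) (y : Int) :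
    y ∈ pvPass2 bc nb ↔ y ∈ nb ∧ y ∈ bc := by
  induction nb with
  | nil => simp [pvPass2]
  | cons i t ih =>
    simp only [pvPass2, List.mem_append, ih, List.mem_map, List.mem_filter, List.mem_cons]
    constructor
    · rintro (⟨j, ⟨hj, hij⟩, rfl⟩ | ⟨h1, h2⟩)
      · exact ⟨Or.inl rfl, by rw [beq_iff_eq.mp hij]; exact hj⟩
      · exact ⟨Or.inr h1, h2⟩
    · rintro ⟨(rfl | h1), h2⟩
      · exact Or.inl ⟨y, ⟨h2, by simp⟩, rfl⟩
      · exact Or.inr ⟨h1, h2⟩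

lemma pv_mem_pvCollect (bc : List Int) (nb nb1 : List Int)
    (h : pvCollect bc nb = some nb1) (y : Int) (hy : y ∈ nb1) :
    y ∈ nb ∨ ∃ z ∈ bc, ∃ l, PySem.List.pyGet? borderL z = some l ∧ y ∈ l := by
  induction bc generalizing nb with
  | nil => simp [pvCollect] at h; subst h; exact Or.inl hy
  | cons z rest ih =>
    simp only [pvCollect] at h
    cases hz : PySem.List.pyGet? borderL z with
    | none => rw [hz] at h; cases h
    | some l =>
      rw [hz] at h
      rcases ih (nb ++ l) h with hmem | ⟨z', hz', l', hl', hy'⟩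
      · rcases List.mem_append.mp hmem with h1 | h2
        · exact Or.inl h1
        · exact Or.inr ⟨z, List.mem_cons_self, l, hz, h2⟩
      · exact Or.inr ⟨z', List.mem_cons_of_mem _ hz', l', hl', hy'⟩

lemma pv_borderL_bound : ∀ l ∈ borderL, ∀ x ∈ l, 0 ≤ x ∧ x < 42 := by decide

lemma pvMeasure_lt (bc bc' : List Int) (w : Int)
    (hsub : ∀ x ∈ bc, x ∈ bc') (h0 : 0 ≤ w) (h42 : w < 42)
    (hout : w ∉ bc) (hin : w ∈ bc') : pvMeasure bc' < pvMeasure bc := by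
  unfold pvMeasure
  apply Finset.card_lt_card
  constructor
  · intro i hi
    simp only [Finset.mem_filter] at hi ⊢
    exact ⟨hi.1, fun hmem => hi.2 (hsub _ hmem)⟩
  · intro hss
    have hw : w.toNat ∈ (Finset.range 42).filter (fun i => ¬ (((i : Nat) : Int) ∈ bc)) := by
      simp only [Finset.mem_filter, Finset.mem_range]
      rw [Int.toNat_of_nonneg h0]
      exact ⟨by omega, hout⟩
    have := hss hw
    simp only [Finset.mem_filter, Int.toNat_of_nonneg h0] at this
    exact this.2 hin

-- facts about one round's surviving frontier, cited by pvALoop's termination proof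
lemma pv_frontier_facts (ownerList : List Int) (playerTurn : Int) (bc nb nb1 : List Int)
    (hnb : ∀ x ∈ nb, x ∈ bc) (hcol : pvCollect bc nb = some nb1) (x : Int)
    (hx : x ∈ PySem.List.dedup
      ((nb1.filter (fun i => ¬ pvOwned ownerList playerTurn i) ++ pvPass2 bc nb1).foldl
        (fun cur i => pvRemoveAll i cur) nb1)) :
    pvOwned ownerList playerTurn x = true ∧ x ∉ bc ∧ 0 ≤ x ∧ x < 42 ∧
      ∃ z ∈ bc, ∃ l, PySem.List.pyGet? borderL z = some l ∧ x ∈ l := by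
  have hx2 := (PySem.List.mem_dedup _ _).mp hx
  have hx1 := (pv_mem_foldl_removeAll _ nb1 x).mp hx2
  have hxbc : x ∉ bc := fun hmem =>
    hx1.2 (List.mem_append_right _ ((pv_mem_pass2 bc nb1 x).mpr ⟨hx1.1, hmem⟩))
  have hown : pvOwned ownerList playerTurn x = true := by
    by_contra hno
    exact hx1.2 (List.mem_append_left _ (List.mem_filter.mpr ⟨hx1.1, by simp [hno]⟩))
  have hedge : ∃ z ∈ bc, ∃ l, PySem.List.pyGet? borderL z = some l ∧ x ∈ l := by
    rcases pv_mem_pvCollect bc nb nb1 hcol x hx1.1 with hnbm | he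
    · exact absurd (hnb x hnbm) hxbc
    · exact he
  rcases hedge with ⟨z, hz, l, hl, hxl⟩
  have hrange := pv_borderL_bound l (PySem.List.mem_of_pyGet?_eq_some _ hl) x hxl
  exact ⟨hown, hxbc, hrange.1, hrange.2, z, hz, l, hl, hxl⟩

-- the while-loop of A: state = (borderCountries, newBorders carried over from the previous round)
def pvALoop (ownerList : List Int) (playerTurn : Int) (bc nb : List Int)
    (hnb : ∀ x ∈ nb, x ∈ bc) : Option (List Int) :=
  match hcol : pvCollect bc nb with
  | none => none                                   -- IndexError on borderList[z]
  | some nb1 =>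
    let rc := nb1.filter (fun i => ¬ pvOwned ownerList playerTurn i) ++ pvPass2 bc nb1
    let nb2 := rc.foldl (fun cur i => pvRemoveAll i cur) nb1
    let nb3 := PySem.List.dedup nb2                -- list(dict.fromkeys(newBorders))
    if h3 : nb3 = [] then some bc
    else pvALoop ownerList playerTurn (bc ++ nb3) nb3 (fun x hx => List.mem_append_right _ hx)
termination_by pvMeasure bc
decreasing_by
  rcases List.exists_mem_of_ne_nil _ h3 with ⟨w, hw⟩
  have hf := pv_frontier_facts ownerList playerTurn bc nb nb1 hnb hcol w hw
  exact pvMeasure_lt bc (bc ++ nb3) w (fun x hx => List.mem_append_left _ hx)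
    hf.2.2.1 hf.2.2.2.1 hf.2.1 (List.mem_append_right _ hw)

def pathCheck (ownerList : List Int) (troopList : List Int) (seedCountry : Int)
    (targetCountry : Int) (playerTurn : Int) : Bool :=
  match pvALoop ownerList playerTurn [seedCountry] [] (by simp) with
  | none => false                                  -- Python raises there; excluded by Pre_
  | some bc => bc.contains targetCountry

-- ===== PORT B =====
-- inner for-loop of B: scan borderList[u], appending owned unseen neighbours to visited
def pvAddNew (ownerList : List Int) (playerTurn : Int) (vs : List Int) (l : List Int) : List Int :=
  l.foldl (fun vs v =>
    if pvOwned ownerList playerTurn v && !(vs.contains v) then vs ++ [v] else vs) vs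

-- shape lemma cited by pvBLoop's termination proof
lemma pvAddNew_append (ownerList : List Int) (playerTurn : Int) (vs l : List Int) :
    ∃ ex, pvAddNew ownerList playerTurn vs l = vs ++ ex ∧
      ∀ x ∈ ex, x ∈ l ∧ x ∉ vs ∧ pvOwned ownerList playerTurn x = true := by
  induction l generalizing vs with
  | nil => exact ⟨[], by simp [pvAddNew], by simp⟩
  | cons v t ih =>
    by_cases hc : (pvOwned ownerList playerTurn v && !(vs.contains v)) = true
    · rcases ih (vs ++ [v]) with ⟨ex', heq, hex'⟩
      refine ⟨v :: ex', ?_, ?_⟩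
      · have hstep : pvAddNew ownerList playerTurn vs (v :: t)
            = pvAddNew ownerList playerTurn (vs ++ [v]) t := by
          simp only [pvAddNew, List.foldl_cons]; rw [if_pos hc]
        rw [hstep, heq, List.append_assoc]; rfl
      · intro x hx
        rcases List.mem_cons.mp hx with rfl | hx'
        · refine ⟨List.mem_cons_self, ?_, Bool.and_elim_left hc⟩
          have := Bool.and_elim_right hc
          simpa using this
        · rcases hex' x hx' with ⟨h1, h2, h3⟩
          exact ⟨List.mem_cons_of_mem _ h1, fun hm => h2 (List.mem_append_left _ hm), h3⟩
    · rcases ih vs with ⟨ex', heq, hex'⟩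
      refine ⟨ex', ?_, fun x hx => ?_⟩
      · have hstep : pvAddNew ownerList playerTurn vs (v :: t)
            = pvAddNew ownerList playerTurn vs t := by
          simp only [pvAddNew, List.foldl_cons]; rw [if_neg hc]
        rw [hstep, heq]
      · rcases hex' x hx with ⟨h1, h2, h3⟩
        exact ⟨List.mem_cons_of_mem _ h1, h2, h3⟩

-- the while-loop of B: visited list plus index pointer
def pvBLoop (ownerList : List Int) (playerTurn : Int) (visited : List Int) (i : Nat) :
    Option (List Int) :=
  if h : i < visited.length then
    match hl : PySem.List.pyGet? borderL (visited[i]) with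
    | none => none                                 -- IndexError on borderList[visited[i]]
    | some l => pvBLoop ownerList playerTurn (pvAddNew ownerList playerTurn visited l) (i + 1)
  else some visited
termination_by (pvMeasure visited, visited.length - i)
decreasing_by
  rcases pvAddNew_append ownerList playerTurn visited l with ⟨ex, heq, hex⟩
  cases ex with
  | nil =>
    rw [heq, List.append_nil]
    exact Prod.Lex.right _ (by omega)
  | cons w t =>
    apply Prod.Lex.left
    have hw := hex w (List.mem_cons_self)
    have hrange := pv_borderL_bound _
      (PySem.List.mem_of_pyGet?_eq_some borderL hl) w hw.1
    exact pvMeasure_lt visited _ w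
      (fun x hx => heq ▸ List.mem_append_left _ hx) hrange.1 hrange.2 hw.2.1
      (heq ▸ List.mem_append_right _ (List.mem_cons_self))

def pathCheck_alt (ownerList : List Int) (troopList : List Int) (seedCountry : Int)
    (targetCountry : Int) (playerTurn : Int) : Bool :=
  match pvBLoop ownerList playerTurn [seedCountry] 0 with
  | none => false                                  -- Python raises there; excluded by Pre_
  | some vs => vs.contains targetCountry

-- ===== PRECONDITION & SPEC =====
-- helpers for stating the precondition: neighbours of a country, and one step of the
-- owned-closure (the set of countries whose border lists A reads owner entries for)
def pvNbrs (u : Int) : List Int := (PySem.List.pyGet? borderL u).getD []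

def pvSpread (ownerList : List Int) (playerTurn : Int) (s : List Int) : List Int :=
  PySem.List.dedup (s ++ s.flatMap (fun u => (pvNbrs u).filter (pvOwned ownerList playerTurn)))

-- the owned closure: iterate pvSpread to a fixpoint (at most n more rounds)
def pvCloseUp (ownerList : List Int) (playerTurn : Int) : Nat → List Int → List Int
  | 0, s => s
  | n + 1, s =>
    if pvSpread ownerList playerTurn s = s then s
    else pvCloseUp ownerList playerTurn n (pvSpread ownerList playerTurn s)

-- Pre_ excludes exactly the IndexErrors: a seed outside [-42, 42) raises on
-- borderList[seedCountry] (Python's negative indices wrap, both programs inherit that), and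
-- A reads ownerList[v] for every neighbour v of every country in the owned closure of the
-- seed, raising if some such v is past the end of ownerList.
def Pre_pathCheck (ownerList : List Int) (troopList : List Int) (seedCountry : Int)
    (targetCountry : Int) (playerTurn : Int) : Prop :=
  -42 ≤ seedCountry ∧ seedCountry < 42 ∧
    ∀ u ∈ pvCloseUp ownerList playerTurn 42 [seedCountry],
      ∀ v ∈ pvNbrs u, v < ownerList.length
instance (ownerList : List Int) (troopList : List Int) (seedCountry : Int) (targetCountry : Int) (playerTurn : Int) : Decidable (Pre_pathCheck ownerList troopList seedCountry targetCountry playerTurn) := by unfold Pre_pathCheck; infer_instance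
def pvWitness_pathCheck : List Int × List Int × Int × Int × Int :=
  ([1,1,1,1,1,1,1,1,1,1,1,1,1,1,1,1,1,1,1,1,1,1,1,1,1,1,1,1,1,1,1,1,1,1,1,1,1,1,1,1,1,1],
   [], 0, 5, 0)

def Spec_pathCheck (ownerList : List Int) (troopList : List Int) (seedCountry : Int) (targetCountry : Int) (playerTurn : Int) (out : Bool) : Prop := out = pathCheck_alt ownerList troopList seedCountry targetCountry playerTurn
instance (ownerList : List Int) (troopList : List Int) (seedCountry : Int) (targetCountry : Int) (playerTurn : Int) (out : Bool) : Decidable (Spec_pathCheck ownerList troopList seedCountry targetCountry playerTurn out) := by unfold Spec_pathCheck; infer_instance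

-- ===== CLAIM (what is proved, stated in full; the proofs are below) =====
def Claim_equal_pathCheck : Prop := ∀ (ownerList : List Int) (troopList : List Int) (seedCountry : Int) (targetCountry : Int) (playerTurn : Int), Dom_pathCheck ownerList troopList seedCountry targetCountry playerTurn → Pre_pathCheck ownerList troopList seedCountry targetCountry playerTurn → Spec_pathCheck ownerList troopList seedCountry targetCountry playerTurn (pathCheck ownerList troopList seedCountry targetCountry playerTurn)

-- ===== LEMMAS AND PROOFS =====
-- the common specification: countries reachable from the seed through owned countries
inductive pvReach (ownerList : List Int) (playerTurn : Int) (seed : Int) : Int → Prop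
  | base : pvReach ownerList playerTurn seed seed
  | step {u v : Int} {l : List Int} : pvReach ownerList playerTurn seed u →
      PySem.List.pyGet? borderL u = some l → v ∈ l →
      pvOwned ownerList playerTurn v = true → pvReach ownerList playerTurn seed v

def pvClosed (ownerList : List Int) (playerTurn : Int) (S : List Int) : Prop :=
  ∀ u ∈ S, ∀ l, PySem.List.pyGet? borderL u = some l →
    ∀ v ∈ l, pvOwned ownerList playerTurn v = true → v ∈ S

lemma pvReach_mem (ownerList : List Int) (playerTurn seed : Int) (S : List Int)
    (hseed : seed ∈ S) (hcl : pvClosed ownerList playerTurn S) :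
    ∀ x, pvReach ownerList playerTurn seed x → x ∈ S := by
  intro x hx
  induction hx with
  | base => exact hseed
  | step hr hl hv ho ih => exact hcl _ ih _ hl _ hv ho

lemma pv_inB (x : Int) (h0 : 0 ≤ x) (h42 : x < 42) :
    (PySem.List.pyGet? borderL x).isSome := by
  rw [Option.isSome_iff_ne_none]
  intro hn
  rw [PySem.List.pyGet?_eq_none_iff] at hn
  exact hn (by simp [PySem.Raise.InRange, borderL]; omega)

lemma pv_pvCollect_isSome (bc nb : List Int)
    (h : ∀ z ∈ bc, (PySem.List.pyGet? borderL z).isSome) :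
    ∃ nb1, pvCollect bc nb = some nb1 := by
  induction bc generalizing nb with
  | nil => exact ⟨nb, rfl⟩
  | cons z rest ih =>
    rcases Option.isSome_iff_exists.mp (h z List.mem_cons_self) with ⟨l, hl⟩
    rcases ih (nb ++ l) (fun z hz => h z (List.mem_cons_of_mem _ hz)) with ⟨nb1, h1⟩
    exact ⟨nb1, by simp only [pvCollect, hl]; exact h1⟩

lemma pv_pvCollect_sub (bc : List Int) (nb nb1 : List Int)
    (h : pvCollect bc nb = some nb1) : ∀ y ∈ nb, y ∈ nb1 := by
  induction bc generalizing nb with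
  | nil => simp [pvCollect] at h; subst h; exact fun y hy => hy
  | cons z rest ih =>
    simp only [pvCollect] at h
    cases hz : PySem.List.pyGet? borderL z with
    | none => rw [hz] at h; cases h
    | some l =>
      rw [hz] at h
      exact fun y hy => ih (nb ++ l) h y (List.mem_append_left _ hy)

lemma pv_pvCollect_complete (bc : List Int) (nb nb1 : List Int)
    (h : pvCollect bc nb = some nb1) :
    ∀ z ∈ bc, ∀ l, PySem.List.pyGet? borderL z = some l → ∀ v ∈ l, v ∈ nb1 := by
  induction bc generalizing nb with
  | nil => simp
  | cons z rest ih =>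
    intro z' hz' l hl v hv
    simp only [pvCollect] at h
    cases hz : PySem.List.pyGet? borderL z with
    | none => rw [hz] at h; cases h
    | some lz =>
      rw [hz] at h
      rcases List.mem_cons.mp hz' with rfl | hmem
      · rw [hl] at hz; injection hz with hz; subst hz
        exact pv_pvCollect_sub rest _ _ h v (List.mem_append_right _ hv)
      · exact ih (nb ++ lz) h z' hmem l hl v hv

lemma pvALoop_sound (ownerList : List Int) (playerTurn seed : Int) :
    ∀ bc nb (hnb : ∀ x ∈ nb, x ∈ bc),
    (∀ z ∈ bc, (PySem.List.pyGet? borderL z).isSome) →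
    (∀ x ∈ bc, pvReach ownerList playerTurn seed x) →
    ∃ bcf, pvALoop ownerList playerTurn bc nb hnb = some bcf ∧
      (∀ x ∈ bc, x ∈ bcf) ∧
      (∀ x ∈ bcf, pvReach ownerList playerTurn seed x) ∧
      pvClosed ownerList playerTurn bcf := by
  intro bc nb hnb
  induction bc, nb, hnb using pvALoop.induct ownerList playerTurn with
  | case1 bc nb hnb hcol =>
    intro hsome _
    rcases pv_pvCollect_isSome bc nb hsome with ⟨nb1, h1⟩
    rw [hcol] at h1; cases h1
  | case2 bc nb hnb nb1 hcol rc nb2 nb3 h3 =>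
    have h3' : PySem.List.dedup
        ((nb1.filter (fun i => ¬ pvOwned ownerList playerTurn i) ++ pvPass2 bc nb1).foldl
          (fun cur i => pvRemoveAll i cur) nb1) = [] := h3
    intro hsome hreach
    refine ⟨bc, ?_, fun x hx => hx, hreach, ?_⟩
    · rw [pvALoop.eq_def]
      split
      · next heq => rw [heq] at hcol; cases hcol
      · next nb1' heq =>
        rw [heq] at hcol; injection hcol with h; subst h
        simp only [h3']; rfl
    · intro u hu l hl v hv hov
      have hvnb1 : v ∈ nb1 := pv_pvCollect_complete bc nb nb1 hcol u hu l hl v hv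
      by_contra hvbc
      have hvrc : v ∉ (nb1.filter (fun i => ¬ pvOwned ownerList playerTurn i)
          ++ pvPass2 bc nb1) := by
        intro hrc
        rcases List.mem_append.mp hrc with hfl | hp2
        · have := (List.mem_filter.mp hfl).2; simp [hov] at this
        · exact hvbc ((pv_mem_pass2 bc nb1 v).mp hp2).2
      have hmem3 := (PySem.List.mem_dedup _ v).mpr
        ((pv_mem_foldl_removeAll _ nb1 v).mpr ⟨hvnb1, hvrc⟩)
      rw [h3'] at hmem3; cases hmem3
  | case3 bc nb hnb nb1 hcol rc nb2 nb3 h3 ih =>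
    have h3' : ¬ PySem.List.dedup
        ((nb1.filter (fun i => ¬ pvOwned ownerList playerTurn i) ++ pvPass2 bc nb1).foldl
          (fun cur i => pvRemoveAll i cur) nb1) = [] := h3
    intro hsome hreach
    have hfacts := fun x hx => pv_frontier_facts ownerList playerTurn bc nb nb1 hnb hcol x hx
    have hsome' : ∀ z ∈ bc ++ PySem.List.dedup
        ((nb1.filter (fun i => ¬ pvOwned ownerList playerTurn i) ++ pvPass2 bc nb1).foldl
          (fun cur i => pvRemoveAll i cur) nb1),
        (PySem.List.pyGet? borderL z).isSome := by
      intro z hz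
      rcases List.mem_append.mp hz with hz1 | hz2
      · exact hsome z hz1
      · rcases hfacts z hz2 with ⟨_, _, hr1, hr2, _⟩
        exact pv_inB z hr1 hr2
    have hreach' : ∀ x ∈ bc ++ PySem.List.dedup
        ((nb1.filter (fun i => ¬ pvOwned ownerList playerTurn i) ++ pvPass2 bc nb1).foldl
          (fun cur i => pvRemoveAll i cur) nb1),
        pvReach ownerList playerTurn seed x := by
      intro x hx
      rcases List.mem_append.mp hx with hx1 | hx2
      · exact hreach x hx1
      · rcases hfacts x hx2 with ⟨hown, _, _, _, z, hz, l, hl, hxl⟩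
        exact pvReach.step (hreach z hz) hl hxl hown
    rcases ih hsome' hreach' with ⟨bcf, heq, hsub, hR, hcl⟩
    refine ⟨bcf, ?_, fun x hx => hsub x (List.mem_append_left _ hx), hR, hcl⟩
    rw [pvALoop.eq_def]
    split
    · next heqc => rw [heqc] at hcol; cases hcol
    · next nb1' heqc =>
      rw [heqc] at hcol; injection hcol with h; subst h
      simp only [h3']
      exact heq

-- monotonicity / completeness of B's inner scan
lemma pv_pvAddNew_mono (ownerList : List Int) (playerTurn : Int) (vs l : List Int) :
    ∀ x ∈ vs, x ∈ pvAddNew ownerList playerTurn vs l := by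
  rcases pvAddNew_append ownerList playerTurn vs l with ⟨ex, heq, _⟩
  rw [heq]; exact fun x hx => List.mem_append_left _ hx

lemma pv_pvAddNew_complete (ownerList : List Int) (playerTurn : Int) (vs l : List Int) :
    ∀ v ∈ l, pvOwned ownerList playerTurn v = true → v ∈ pvAddNew ownerList playerTurn vs l := by
  induction l generalizing vs with
  | nil => simp
  | cons w t ih =>
    intro v hv hov
    by_cases hc : (pvOwned ownerList playerTurn w && !(vs.contains w)) = true
    · have hstep : pvAddNew ownerList playerTurn vs (w :: t)
          = pvAddNew ownerList playerTurn (vs ++ [w]) t := by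
        simp only [pvAddNew, List.foldl_cons]; rw [if_pos hc]
      rw [hstep]
      rcases List.mem_cons.mp hv with rfl | hvt
      · exact pv_pvAddNew_mono ownerList playerTurn _ t v
          (List.mem_append_right _ (List.mem_singleton_self _))
      · exact ih (vs ++ [w]) v hvt hov
    · have hstep : pvAddNew ownerList playerTurn vs (w :: t)
          = pvAddNew ownerList playerTurn vs t := by
        simp only [pvAddNew, List.foldl_cons]; rw [if_neg hc]
      rw [hstep]
      rcases List.mem_cons.mp hv with rfl | hvt
      · have hcont : vs.contains v = true := by
          by_contra hcf
          refine hc ?_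
          simp only [hov, Bool.true_and, Bool.not_eq_true']
          exact Bool.not_eq_true _ ▸ (by simpa using hcf)
        exact pv_pvAddNew_mono ownerList playerTurn vs t v (by simpa using hcont)
      · exact ih vs v hvt hov

lemma pvBLoop_sound (ownerList : List Int) (playerTurn seed : Int) :
    ∀ visited i, i ≤ visited.length →
    (∀ z ∈ visited, (PySem.List.pyGet? borderL z).isSome) →
    (∀ x ∈ visited, pvReach ownerList playerTurn seed x) →
    (∀ j (hj : j < i) (hj' : j < visited.length), ∀ l,
        PySem.List.pyGet? borderL (visited[j]) = some l →
        ∀ v ∈ l, pvOwned ownerList playerTurn v = true → v ∈ visited) →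
    ∃ vf, pvBLoop ownerList playerTurn visited i = some vf ∧
      (∀ x ∈ visited, x ∈ vf) ∧
      (∀ x ∈ vf, pvReach ownerList playerTurn seed x) ∧
      pvClosed ownerList playerTurn vf := by
  intro visited i
  induction visited, i using pvBLoop.induct ownerList playerTurn with
  | case1 visited i h hl =>
    intro _ hsome _ _
    have := hsome (visited[i]) (List.getElem_mem h)
    rw [hl] at this; cases this
  | case2 visited i h l hl ih =>
    intro _ hsome hreach hpref
    rcases pvAddNew_append ownerList playerTurn visited l with ⟨ex, heq, hex⟩
    have hmono := pv_pvAddNew_mono ownerList playerTurn visited l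
    have hlen : visited.length ≤ (pvAddNew ownerList playerTurn visited l).length := by
      rw [heq]; simp
    have hsome' : ∀ z ∈ pvAddNew ownerList playerTurn visited l,
        (PySem.List.pyGet? borderL z).isSome := by
      intro z hz
      rw [heq] at hz
      rcases List.mem_append.mp hz with hz1 | hz2
      · exact hsome z hz1
      · rcases hex z hz2 with ⟨hzl, _, _⟩
        have hr := pv_borderL_bound l (PySem.List.mem_of_pyGet?_eq_some _ hl) z hzl
        exact pv_inB z hr.1 hr.2
    have hreach' : ∀ x ∈ pvAddNew ownerList playerTurn visited l,
        pvReach ownerList playerTurn seed x := by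
      intro x hx
      rw [heq] at hx
      rcases List.mem_append.mp hx with hx1 | hx2
      · exact hreach x hx1
      · rcases hex x hx2 with ⟨hxl, _, hox⟩
        exact pvReach.step (hreach (visited[i]) (List.getElem_mem h)) hl hxl hox
    have hpref' : ∀ j (hj : j < i + 1)
        (hj' : j < (pvAddNew ownerList playerTurn visited l).length), ∀ l',
        PySem.List.pyGet? borderL ((pvAddNew ownerList playerTurn visited l)[j]) = some l' →
        ∀ v ∈ l', pvOwned ownerList playerTurn v = true →
          v ∈ pvAddNew ownerList playerTurn visited l := by
      intro j hj hj' l' hl' v hv hov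
      have hjlen : j < visited.length := by omega
      have hgj : (pvAddNew ownerList playerTurn visited l)[j]'hj' = visited[j]'hjlen := by
        simp only [heq]
        exact List.getElem_append_left hjlen
      rw [hgj] at hl'
      by_cases hji : j < i
      · exact hmono v (hpref j hji hjlen l' hl' v hv hov)
      · have : j = i := by omega
        subst this
        rw [hl] at hl'; injection hl' with hll; subst hll
        exact pv_pvAddNew_complete ownerList playerTurn visited l v hv hov
    rcases ih (by omega) hsome' hreach' hpref' with ⟨vf, heqf, hsub, hR, hcl⟩
    refine ⟨vf, ?_, fun x hx => hsub x (hmono x hx), hR, hcl⟩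
    rw [pvBLoop.eq_def]
    rw [dif_pos h]
    split
    · next heqc => rw [heqc] at hl; cases hl
    · next l'' heqc =>
      rw [heqc] at hl; injection hl with hll; subst hll
      exact heqf
  | case3 visited i h =>
    intro _ hsome hreach hpref
    refine ⟨visited, ?_, fun x hx => hx, hreach, ?_⟩
    · rw [pvBLoop.eq_def]; rw [dif_neg h]
    · intro u hu l hl v hv hov
      rcases List.mem_iff_getElem.mp hu with ⟨j, hj, hju⟩
      have hji : j < i := by omega
      exact hpref j hji hj l (by rw [hju]; exact hl) v hv hov

-- ===== VERDICT (by name: the statement is the Claim_ definition above) =====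
theorem pathCheck_spec : Claim_equal_pathCheck := by
  intro ownerList troopList seedCountry targetCountry playerTurn _hDom hPre
  unfold Spec_pathCheck
  obtain ⟨h1, h2, _h3⟩ := hPre
  have hseedB : (PySem.List.pyGet? borderL seedCountry).isSome := by
    rw [Option.isSome_iff_ne_none]
    intro hn
    rw [PySem.List.pyGet?_eq_none_iff] at hn
    exact hn (by simp [PySem.Raise.InRange, borderL]; omega)
  have hsome : ∀ z ∈ [seedCountry], (PySem.List.pyGet? borderL z).isSome := by
    intro z hz; rw [List.mem_singleton] at hz; subst hz; exact hseedB
  have hreach : ∀ x ∈ [seedCountry], pvReach ownerList playerTurn seedCountry x := by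
    intro x hx; rw [List.mem_singleton] at hx; subst hx; exact pvReach.base
  rcases pvALoop_sound ownerList playerTurn seedCountry [seedCountry] [] (by simp)
      hsome hreach with ⟨bcA, hA, hsubA, hRA, hclA⟩
  rcases pvBLoop_sound ownerList playerTurn seedCountry [seedCountry] 0 (by simp)
      hsome hreach (by omega) with ⟨vB, hB, hsubB, hRB, hclB⟩
  have hiff : ∀ x, x ∈ bcA ↔ x ∈ vB := by
    intro x
    constructor
    · intro hx
      exact pvReach_mem ownerList playerTurn seedCountry vB
        (hsubB _ (List.mem_singleton_self _)) hclB x (hRA x hx)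
    · intro hx
      exact pvReach_mem ownerList playerTurn seedCountry bcA
        (hsubA _ (List.mem_singleton_self _)) hclA x (hRB x hx)
  unfold pathCheck pathCheck_alt
  rw [hA, hB]
  simp only [List.contains_eq_mem]
  by_cases ht : targetCountry ∈ bcA
  · simp [ht, (hiff targetCountry).mp ht]
  · have : targetCountry ∉ vB := fun h => ht ((hiff targetCountry).mpr h)
    simp [ht, this]
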